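-- pv_equiv track=rewrite | github.com/xupeiwust/TrioCFD-code | share/bin/PyTools/commons/Tools.py | addparf
-- ===== SOURCE A (Python) =====
-- def addparf(string):
--     """
--     Cette fonction ajouter des parentheses s'il y en a besoin pour une opération de type multiplication à la chaine de charactère.
--
--     Args:
--         string (str): la chaine a évaluer
--
--     Return:
--         str: la chaine modifiée
--     """
--     add = False
--     openpar = 0
--     for char in string:
--         if ((char == "+") or (char == "-")) and (openpar == 0):
--             add = True
--         if char == "(" or char == "{":
--             openpar += 1
--         elif char == ")" or char == "}":
--             openpar -= 1
--     if add:
--         string = "(" + string + ")"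
--     return string
-- ===== SOURCE B (Python) =====
-- def addparf(string):
--     # Brute force: a '+'/'-' is top-level iff its prefix has as many opens as closes.
--     def balanced(prefix):
--         return prefix.count('(') + prefix.count('{') == prefix.count(')') + prefix.count('}')
--     signs = [i for i, c in enumerate(string) if c in '+-']
--     if any(balanced(string[:i]) for i in signs):
--         return '(' + string + ')'
--     return string
-- ===== Notes on version B (the rewrite author's own statement) =====
-- stated objective: alternative
-- what changed: Replaces A's single stateful pass with a running depth counter by a brute-force check: collect the indices of the sign characters and for each one independently count opening and closing brackets in its prefix (str.count), wrapping the string if any such prefix is balanced.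
import Mathlib
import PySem

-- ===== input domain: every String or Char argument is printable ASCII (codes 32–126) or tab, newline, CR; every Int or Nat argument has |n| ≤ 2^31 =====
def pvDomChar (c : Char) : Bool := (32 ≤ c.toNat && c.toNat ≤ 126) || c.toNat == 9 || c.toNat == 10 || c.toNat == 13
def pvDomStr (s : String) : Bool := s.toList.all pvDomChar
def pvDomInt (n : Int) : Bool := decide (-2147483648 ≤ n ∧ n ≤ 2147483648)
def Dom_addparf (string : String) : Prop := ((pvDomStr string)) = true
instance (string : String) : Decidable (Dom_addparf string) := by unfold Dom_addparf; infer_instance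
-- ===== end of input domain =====

-- B replaces A's single stateful counter loop by a brute-force per-sign prefix-count check; alternative structure, not faster.

-- ===== PORT A =====
-- A's loop body over the state (add, openpar)
def addparf_step (s : Bool × Int) (char : Char) : Bool × Int :=
  let add := if (char == '+' || char == '-') && s.2 == 0 then true else s.1
  let openpar := if char == '(' || char == '{' then s.2 + 1
                 else if char == ')' || char == '}' then s.2 - 1
                 else s.2
  (add, openpar)

def addparf (string : String) : String :=
  let st := string.toList.foldl addparf_step (false, 0)
  if st.1 then "(" ++ string ++ ")" else string

-- ===== PORT B =====
-- Source B's balanced(prefix): as many opening as closing brackets (str.count of a single char = List.count)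
def addparf_balanced (p : List Char) : Bool :=
  p.count '(' + p.count '{' == p.count ')' + p.count '}'

def addparf_alt (string : String) : String :=
  let cs := string.toList
  let signs := ((PySem.List.enumerate cs).filter (fun ic => ic.2 == '+' || ic.2 == '-')).map (·.1)
  if signs.any (fun i => addparf_balanced (cs.take i.toNat)) then "(" ++ string ++ ")"
  else string

-- ===== PRECONDITION & SPEC =====
def Spec_addparf (string : String) (out : String) : Prop := out = addparf_alt string
instance (string : String) (out : String) : Decidable (Spec_addparf string out) := by unfold Spec_addparf; infer_instance

-- ===== CLAIM (what is proved, stated in full; the proofs are below) =====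
def Claim_equal_addparf : Prop := ∀ (string : String), Dom_addparf string → Spec_addparf string (addparf string)

-- ===== LEMMAS AND PROOFS =====

-- signed bracket balance of a prefix
def addparf_bal (p : List Char) : Int :=
  ((p.count '(' : Int) + p.count '{') - ((p.count ')' : Int) + p.count '}')

-- recursive middle form: "some sign occurs at depth 0, starting from depth d"
def addparf_mid (d : Int) : List Char → Bool
  | [] => false
  | c :: cs => ((c == '+' || c == '-') && decide (d = 0)) || addparf_mid (d + addparf_bal [c]) cs

lemma addparf_step_snd (d : Int) (a : Bool) (c : Char) :
    (addparf_step (a, d) c).2 = d + addparf_bal [c] := by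
  simp only [addparf_step, addparf_bal]
  by_cases h1 : c = '(' <;> by_cases h2 : c = '{' <;>
  by_cases h3 : c = ')' <;> by_cases h4 : c = '}' <;>
  simp_all <;> omega

lemma addparf_balanced_eq (p : List Char) :
    addparf_balanced p = decide (addparf_bal p = 0) := by
  simp only [addparf_balanced, addparf_bal]
  by_cases h : (p.count '(' + p.count '{') = (p.count ')' + p.count '}')
  · have hz : (((p.count '(' : Int) + p.count '{') - ((p.count ')' : Int) + p.count '}') = 0) := by omega
    simp [h, hz]
  · have hz : ¬ (((p.count '(' : Int) + p.count '{') - ((p.count ')' : Int) + p.count '}') = 0) := by omega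
    simp [h, hz]

lemma addparf_bal_append (p q : List Char) :
    addparf_bal (p ++ q) = addparf_bal p + addparf_bal q := by
  simp [addparf_bal, List.count_append]; omega

-- A-side: the fold's flag equals the recursive middle form
lemma addparf_fold_fst (cs : List Char) (a : Bool) (d : Int) :
    (cs.foldl addparf_step (a, d)).1 = (a || addparf_mid d cs) := by
  induction cs generalizing a d with
  | nil => simp [addparf_mid]
  | cons c cs ih =>
    simp only [List.foldl_cons, addparf_mid]
    rw [show cs.foldl addparf_step (addparf_step (a, d) c)
          = cs.foldl addparf_step ((addparf_step (a, d) c).1, (addparf_step (a, d) c).2) by rfl,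
        addparf_step_snd, ih]
    have hfst : (addparf_step (a, d) c).1
        = (((c == '+' || c == '-') && decide (d = 0)) || a) := by
      simp only [addparf_step]
      cases hd : decide (d = 0)
      · simp at hd; simp [hd]
      · simp at hd; subst hd; cases hs : (c == '+' || c == '-') <;> simp
    rw [hfst]
    cases a <;> cases hs : ((c == '+' || c == '-') && decide (d = 0)) <;> simp


-- B-side: the enumerate/any scan over prefixes of pre ++ cs equals the recursive middle form
lemma addparf_any_enum (cs : List Char) (pre : List Char) :
    ((PySem.List.enumerate cs (pre.length : Int)).any
        (fun ic => (ic.2 == '+' || ic.2 == '-') && addparf_balanced ((pre ++ cs).take ic.1.toNat)))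
      = addparf_mid (addparf_bal pre) cs := by
  induction cs generalizing pre with
  | nil => simp [PySem.List.enumerate_nil, addparf_mid]
  | cons c cs ih =>
    rw [PySem.List.enumerate_cons, List.any_cons]
    have htake : (pre ++ c :: cs).take ((pre.length : Int)).toNat = pre := by
      simp
    have hshift : ((pre.length : Int) + 1) = (((pre ++ [c]).length : Int)) := by
      simp
    have happ : pre ++ c :: cs = (pre ++ [c]) ++ cs := by simp
    rw [htake, hshift, happ, ih (pre ++ [c]), addparf_mid]
    have hbal : addparf_bal (pre ++ [c]) = addparf_bal pre + addparf_bal [c] :=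
      addparf_bal_append pre [c]
    rw [hbal, addparf_balanced_eq]

-- ===== VERDICT (by name: the statement is the Claim_ definition above) =====
theorem addparf_spec : Claim_equal_addparf := by
  intro s _
  show addparf s = addparf_alt s
  simp only [addparf, addparf_alt, List.any_map, List.any_filter]
  rw [addparf_fold_fst]
  have h := addparf_any_enum s.toList []
  simp only [List.length_nil, Int.natCast_zero, List.nil_append] at h
  rw [show addparf_bal [] = 0 by rfl] at h
  rw [← h]
  simp only [Function.comp_def, Bool.false_or]
  rfl
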